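-- pv_equiv track=rewrite | github.com/deysantanu84/python-portfolio | problemSolving/graphs/smallestSequenceOfGivenPrimes.py | solve
-- ===== SOURCE A (Python) =====
-- from heapq import heappop, heappush, heapify
--
-- def solve(A, B, C, D):
--     nums = [A, B, C]
--     result = []
--     finished = set()
--     i = 0
--     heap = list(nums)
--     heapify(heap)
--
--     while i < D:
--         curr = heappop(heap)
--         if curr in finished:
--             continue
--
--         result.append(curr)
--         finished.add(curr)
--         i += 1
--
--         for n in nums:
--             heappush(heap, curr * n)
--
--     return result
-- ===== SOURCE B (Python) =====
-- def solve(A, B, C, D):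
--     # Eager-dedup best-first search over a DESCENDING sorted list: emit the
--     # minimum (the last element) each round, insert unseen products by a
--     # hand-written binary search (no heap, no lazy skipping of duplicate pops).
--     factors = (A, B, C)
--     frontier = sorted({A, B, C}, reverse=True)  # descending: min at the end
--     seen = set(frontier)
--     result = []
--     for _ in range(D):
--         m = frontier.pop()
--         result.append(m)
--         for n in factors:
--             c = m * n
--             if c not in seen:
--                 seen.add(c)
--                 lo, hi = 0, len(frontier)
--                 while lo < hi:
--                     mid = (lo + hi) // 2
--                     if frontier[mid] > c:
--                         lo = mid + 1
--                     else:
--                         hi = mid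
--                 frontier.insert(lo, c)
--     return result
-- ===== Notes on version B (the rewrite author's own statement) =====
-- stated objective: alternative
-- what changed: Replaces the heap with lazy duplicate skipping (pop, test against 'finished', re-loop) by an eager-dedup frontier kept as a descending sorted list: the minimum is popped from the end and unseen products are placed by a hand-written binary search, so duplicates are filtered at insertion time and no popped element is ever discarded. (Pre_solve excludes the inputs where both programs raise: all of |A|,|B|,|C| <= 1 with D exceeding the closed-form count of distinct products, at most 3.)
import Mathlib
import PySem

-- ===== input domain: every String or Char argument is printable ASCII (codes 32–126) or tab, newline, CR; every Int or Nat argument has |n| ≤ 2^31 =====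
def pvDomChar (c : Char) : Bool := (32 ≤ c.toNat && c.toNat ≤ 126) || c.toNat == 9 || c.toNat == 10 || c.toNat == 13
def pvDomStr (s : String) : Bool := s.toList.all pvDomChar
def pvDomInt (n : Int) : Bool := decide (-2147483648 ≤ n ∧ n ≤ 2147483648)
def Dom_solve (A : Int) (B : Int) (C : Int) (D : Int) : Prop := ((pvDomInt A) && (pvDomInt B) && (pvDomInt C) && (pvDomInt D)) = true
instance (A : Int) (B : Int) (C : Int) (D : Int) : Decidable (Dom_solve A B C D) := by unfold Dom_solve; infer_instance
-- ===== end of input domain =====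

-- B replaces A's heap with lazy duplicate skipping by an eager-dedup frontier set whose
-- minimum is emitted each round (objective: alternative/simpler structure, same cost class).

-- ===== PORT A =====
-- heapq is modeled by a sorted multiset (ascending list): heappop = take the head,
-- heappush = ordered insert, heapify = insertion-sort; the pop order (the only thing
-- A observes about the heap) is exactly heapq's.
def heapInsert (x : Int) : List Int → List Int
  | [] => [x]
  | y :: ys => if x ≤ y then x :: y :: ys else y :: heapInsert x ys

def heapify (xs : List Int) : List Int := xs.foldl (fun h v => heapInsert v h) []

-- the while loop of A; fuel bounds the number of iterations (each iteration pops one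
-- element, so 3*D.toNat + 4 ≥ |heap| + 3*(emits remaining) always suffices; see solve)
def solveLoopA (nums : List Int) (D : Int) : Nat → List Int → PySem.Set Int → List Int → Int → List Int
  | 0, _, _, result, _ => result
  | fuel + 1, heap, finished, result, i =>
    if i < D then
      match heap with
      | [] => result      -- Python: heappop raises IndexError here; excluded by Pre_solve
      | curr :: rest =>
        if finished.contains curr then
          solveLoopA nums D fuel rest finished result i
        else
          solveLoopA nums D fuel
            (nums.foldl (fun h n => heapInsert (curr * n) h) rest)
            (PySem.Set.add finished curr) (result ++ [curr]) (i + 1)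
    else result

def solve (A : Int) (B : Int) (C : Int) (D : Int) : List Int :=
  let nums : List Int := [A, B, C]
  solveLoopA nums D (3 * D.toNat + 4) (heapify nums) (PySem.Set.ofList []) [] 0

-- ===== PORT B =====
-- the hand-written binary search of Source B (while lo < hi), exact step for step:
-- (lo+hi)//2 on nonnegative ints is Nat division; frontier[mid] has 0 <= mid < hi <= len,
-- always in range, so pyGetD is exact
def bisectLoop (frontier : List Int) (c : Int) (lo hi : Nat) : Nat :=
  if lo < hi then
    let mid := (lo + hi) / 2
    if PySem.List.pyGetD frontier (mid : Int) 0 > c then bisectLoop frontier c (mid + 1) hi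
    else bisectLoop frontier c lo mid
  else lo
termination_by hi - lo
decreasing_by all_goals omega

-- the for-loop of B: each round pops the last element of the descending frontier
-- (its minimum), emits it, and binary-inserts the unseen products
def solveLoopB (factors : List Int) : Nat → List Int → PySem.Set Int → List Int → List Int
  | 0, _, _, result => result
  | k + 1, frontier, seen, result =>
    match PySem.List.pop? frontier (-1) with
    | none => result      -- Python: pop() of the empty list raises IndexError; excluded by Pre_solve
    | some (m, fr) =>
      let st := factors.foldl
        (fun (p : List Int × PySem.Set Int) n =>
          let c := m * n
          if p.2.contains c then p
          else (PySem.List.insert p.1 ((bisectLoop p.1 c 0 p.1.length : Nat) : Int) c,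
                PySem.Set.add p.2 c))
        (fr, seen)
      solveLoopB factors k st.1 st.2 (result ++ [m])

def solve_alt (A : Int) (B : Int) (C : Int) (D : Int) : List Int :=
  let factors : List Int := [A, B, C]
  let frontier := PySem.List.sorted (PySem.Set.ofList [A, B, C]) (fun x => x) true
  solveLoopB factors D.toNat frontier (PySem.Set.ofList frontier) []

-- ===== PRECONDITION & SPEC =====
-- Pre_solve excludes exactly the inputs on which the Python A raises IndexError (and B
-- ValueError): all of |A|,|B|,|C| ≤ 1, so that only finitely many distinct products
-- exist, and D asks for more of them than that closed-form count.
def Pre_solve (A : Int) (B : Int) (C : Int) (D : Int) : Prop :=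
  (2 ≤ A.natAbs ∨ 2 ≤ B.natAbs ∨ 2 ≤ C.natAbs)
  ∨ D ≤ (if A = 0 ∨ B = 0 ∨ C = 0 then (1 : Int) else 0)
      + (if A = -1 ∨ B = -1 ∨ C = -1 then 1 else 0)
      + (if A = 1 ∨ B = 1 ∨ C = 1 ∨ A = -1 ∨ B = -1 ∨ C = -1 then 1 else 0)
instance (A : Int) (B : Int) (C : Int) (D : Int) : Decidable (Pre_solve A B C D) := by
  unfold Pre_solve; infer_instance

def pvWitness_solve : Int × Int × Int × Int := (2, 3, 5, 7)

def Spec_solve (A : Int) (B : Int) (C : Int) (D : Int) (out : List Int) : Prop := out = solve_alt A B C D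
instance (A : Int) (B : Int) (C : Int) (D : Int) (out : List Int) : Decidable (Spec_solve A B C D out) := by unfold Spec_solve; infer_instance

-- ===== CLAIM (what is proved, stated in full; the proofs are below) =====
def Claim_equal_solve : Prop := ∀ (A : Int) (B : Int) (C : Int) (D : Int), Dom_solve A B C D → Pre_solve A B C D → Spec_solve A B C D (solve A B C D)

-- ===== LEMMAS AND PROOFS =====

theorem mem_heapInsert (x v : Int) (h : List Int) : x ∈ heapInsert v h ↔ x = v ∨ x ∈ h := by
  induction h with
  | nil => simp [heapInsert]
  | cons y ys ih =>
    simp only [heapInsert]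
    split_ifs
    · simp
    · simp [ih]
      tauto

theorem sorted_heapInsert (v : Int) (h : List Int) (hs : h.Pairwise (· ≤ ·)) :
    (heapInsert v h).Pairwise (· ≤ ·) := by
  induction h with
  | nil => simp [heapInsert]
  | cons y ys ih =>
    simp only [heapInsert]
    rcases List.pairwise_cons.mp hs with ⟨hy, hys⟩
    split_ifs with hle
    · exact List.pairwise_cons.mpr ⟨by intro z hz; rcases List.mem_cons.mp hz with rfl | hz; exact hle; exact le_trans hle (hy z hz), hs⟩
    · refine List.pairwise_cons.mpr ⟨?_, ih hys⟩
      intro z hz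
      rcases (mem_heapInsert z v ys).mp hz with rfl | hz
      · omega
      · exact hy z hz

theorem mem_pushAll (nums : List Int) (curr x : Int) (h : List Int) :
    x ∈ nums.foldl (fun h n => heapInsert (curr * n) h) h ↔ x ∈ h ∨ ∃ n ∈ nums, x = curr * n := by
  induction nums generalizing h with
  | nil => simp
  | cons n ns ih =>
    simp only [List.foldl_cons, ih, mem_heapInsert]
    constructor
    · rintro (⟨rfl | hx⟩ | ⟨m, hm, rfl⟩)
      · exact Or.inr ⟨n, by simp⟩
      · exact Or.inl hx
      · exact Or.inr ⟨m, by simp [hm]⟩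
    · rintro (hx | ⟨m, hm, rfl⟩)
      · exact Or.inl (Or.inr hx)
      · rcases List.mem_cons.mp hm with rfl | hm
        · exact Or.inl (Or.inl rfl)
        · exact Or.inr ⟨m, hm, rfl⟩

theorem sorted_pushAll (nums : List Int) (curr : Int) (h : List Int) (hs : h.Pairwise (· ≤ ·)) :
    (nums.foldl (fun h n => heapInsert (curr * n) h) h).Pairwise (· ≤ ·) := by
  induction nums generalizing h with
  | nil => exact hs
  | cons n ns ih => exact ih _ (sorted_heapInsert _ _ hs)

theorem length_heapInsert (v : Int) (h : List Int) : (heapInsert v h).length = h.length + 1 := by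
  induction h with
  | nil => rfl
  | cons y ys ih =>
    simp only [heapInsert]
    split_ifs <;> simp [ih]

theorem length_pushAll (nums : List Int) (curr : Int) (h : List Int) :
    (nums.foldl (fun h n => heapInsert (curr * n) h) h).length = h.length + nums.length := by
  induction nums generalizing h with
  | nil => simp
  | cons n ns ih =>
    simp only [List.foldl_cons, ih, length_heapInsert, List.length_cons]
    omega

theorem sorted_heapify (xs : List Int) : (heapify xs).Pairwise (· ≤ ·) := by
  unfold heapify
  suffices h : ∀ acc : List Int, acc.Pairwise (· ≤ ·) →
      (xs.foldl (fun h v => heapInsert v h) acc).Pairwise (· ≤ ·) from h [] (by simp)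
  induction xs with
  | nil => intro acc hacc; exact hacc
  | cons y ys ih => intro acc hacc; exact ih _ (sorted_heapInsert _ _ hacc)

theorem mem_heapify (xs : List Int) (x : Int) : x ∈ heapify xs ↔ x ∈ xs := by
  unfold heapify
  suffices h : ∀ acc : List Int, x ∈ xs.foldl (fun h v => heapInsert v h) acc ↔ x ∈ acc ∨ x ∈ xs by
    simpa using h []
  induction xs with
  | nil => simp
  | cons y ys ih =>
    intro acc
    simp only [List.foldl_cons, ih, mem_heapInsert]
    constructor <;> rintro h <;> simp at h ⊢ <;> tauto

-- elements of a strictly descending list, read through getD, are antitone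
theorem getD_desc (fr : List Int) (hsort : fr.Pairwise (· > ·)) (i j : Nat)
    (hij : i ≤ j) (hj : j < fr.length) : fr.getD j 0 ≤ fr.getD i 0 := by
  rcases Nat.lt_or_ge i j with hlt | hge
  · rw [List.getD_eq_getElem _ _ hj, List.getD_eq_getElem _ _ (lt_of_le_of_lt hij hj)]
    exact le_of_lt (List.pairwise_iff_getElem.mp hsort i j (lt_of_le_of_lt hij hj) hj hlt)
  · have he : i = j := le_antisymm hij hge
    rw [he]

theorem pairwise_gt_of_ge_nodup (l : List Int)
    (h1 : l.Pairwise (fun a b => b ≤ a)) (h2 : l.Nodup) : l.Pairwise (· > ·) := by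
  refine (h1.and h2).imp ?_
  rintro a b ⟨hle, hne⟩
  exact lt_of_le_of_ne hle (Ne.symm hne)

-- correctness of Source B's binary search on a strictly descending list
theorem bisectLoop_spec (fr : List Int) (c : Int) (hsort : fr.Pairwise (· > ·)) :
    ∀ (d lo hi : Nat), hi - lo ≤ d → lo ≤ hi → hi ≤ fr.length →
    (∀ i, i < lo → fr.getD i 0 > c) →
    (∀ i, hi ≤ i → i < fr.length → ¬ fr.getD i 0 > c) →
    bisectLoop fr c lo hi ≤ fr.length ∧
    (∀ i, i < bisectLoop fr c lo hi → fr.getD i 0 > c) ∧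
    (∀ i, bisectLoop fr c lo hi ≤ i → i < fr.length → ¬ fr.getD i 0 > c) := by
  intro d
  induction d with
  | zero =>
    intro lo hi h0 hle hlen hpre hpost
    have he : hi = lo := by omega
    rw [bisectLoop, if_neg (by omega)]
    exact ⟨by omega, hpre, fun i h1 h2 => hpost i (by omega) h2⟩
  | succ d ih =>
    intro lo hi h0 hle hlen hpre hpost
    by_cases hlo : lo < hi
    · rw [bisectLoop]
      simp only [if_pos hlo, PySem.List.pyGetD_natCast]
      by_cases hgt : fr.getD ((lo + hi) / 2) 0 > c
      · rw [if_pos hgt]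
        refine ih ((lo + hi) / 2 + 1) hi (by omega) (by omega) hlen ?_ hpost
        intro i hi2
        rcases Nat.lt_or_ge i lo with h | h
        · exact hpre i h
        · exact lt_of_lt_of_le hgt (getD_desc fr hsort i ((lo + hi) / 2) (by omega) (by omega))
      · rw [if_neg hgt]
        refine ih lo ((lo + hi) / 2) (by omega) (by omega) (by omega) hpre ?_
        intro i h1 h2 hcon
        exact hgt (lt_of_lt_of_le hcon (getD_desc fr hsort ((lo + hi) / 2) i h1 h2))
    · rw [bisectLoop, if_neg hlo]
      exact ⟨by omega, hpre, fun i h1 h2 => hpost i (by omega) h2⟩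

-- binary insertion of a new element keeps the frontier a strictly descending list
theorem insert_bisect (fr : List Int) (c : Int) (hsort : fr.Pairwise (· > ·)) (hc : c ∉ fr) :
    (∀ x, x ∈ PySem.List.insert fr ((bisectLoop fr c 0 fr.length : Nat) : Int) c ↔ x ∈ fr ∨ x = c) ∧
    (PySem.List.insert fr ((bisectLoop fr c 0 fr.length : Nat) : Int) c).Pairwise (· > ·) := by
  obtain ⟨hle, hpre, hpost⟩ := bisectLoop_spec fr c hsort fr.length 0 fr.length (by omega)
    (by omega) (le_refl _) (fun i h => absurd h (by omega)) (fun i h1 h2 => absurd (lt_of_le_of_lt h1 h2) (lt_irrefl _))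
  have htake : ∀ a ∈ fr.take (bisectLoop fr c 0 fr.length), c < a := by
    intro a ha
    obtain ⟨i, hi, rfl⟩ := List.mem_iff_getElem.mp ha
    have hip : i < bisectLoop fr c 0 fr.length := lt_of_lt_of_le hi (by simp)
    have hif : i < fr.length := lt_of_lt_of_le hi (by simp)
    have := hpre i hip
    rw [List.getD_eq_getElem _ _ hif] at this
    simpa [List.getElem_take] using this
  have hdrop : ∀ b ∈ fr.drop (bisectLoop fr c 0 fr.length), b < c := by
    intro b hb
    obtain ⟨k, hk, rfl⟩ := List.mem_iff_getElem.mp hb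
    have hkf : bisectLoop fr c 0 fr.length + k < fr.length := by
      simp only [List.length_drop] at hk; omega
    have h1 := hpost (bisectLoop fr c 0 fr.length + k) (by omega) hkf
    rw [List.getD_eq_getElem _ _ hkf] at h1
    have h2 : fr[bisectLoop fr c 0 fr.length + k] ≠ c := fun h => hc (h ▸ List.getElem_mem _)
    rw [List.getElem_drop]
    omega
  rw [PySem.List.insert_natCast fr _ c hle]
  constructor
  · intro x
    conv_rhs => rw [← List.take_append_drop (bisectLoop fr c 0 fr.length) fr]
    simp only [List.mem_append, List.mem_cons]
    tauto
  · rw [List.pairwise_append]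
    refine ⟨hsort.sublist (List.take_sublist ..), ?_, ?_⟩
    · rw [List.pairwise_cons]
      exact ⟨fun b hb => hdrop b hb, hsort.sublist (List.drop_sublist ..)⟩
    · intro a ha b hb
      rcases List.mem_cons.mp hb with rfl | hb
      · exact htake a ha
      · exact lt_trans (hdrop b hb) (htake a ha)

-- the inner 'for n in factors' loop of B: membership of the new frontier and seen
-- sets, and preservation of the descending order
theorem stepB (factors : List Int) (m : Int) :
    ∀ (Fr : List Int) (S : PySem.Set Int),
    Fr.Pairwise (· > ·) → (∀ x ∈ Fr, x ∈ S) →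
    (∀ x, x ∈ (factors.foldl
        (fun (p : List Int × PySem.Set Int) n =>
          let c := m * n
          if p.2.contains c then p
          else (PySem.List.insert p.1 ((bisectLoop p.1 c 0 p.1.length : Nat) : Int) c,
                PySem.Set.add p.2 c)) (Fr, S)).1
      ↔ x ∈ Fr ∨ (x ∉ S ∧ ∃ n ∈ factors, x = m * n)) ∧
    (∀ x, x ∈ (factors.foldl
        (fun (p : List Int × PySem.Set Int) n =>
          let c := m * n
          if p.2.contains c then p
          else (PySem.List.insert p.1 ((bisectLoop p.1 c 0 p.1.length : Nat) : Int) c,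
                PySem.Set.add p.2 c)) (Fr, S)).2
      ↔ x ∈ S ∨ ∃ n ∈ factors, x = m * n) ∧
    ((factors.foldl
        (fun (p : List Int × PySem.Set Int) n =>
          let c := m * n
          if p.2.contains c then p
          else (PySem.List.insert p.1 ((bisectLoop p.1 c 0 p.1.length : Nat) : Int) c,
                PySem.Set.add p.2 c)) (Fr, S)).1.Pairwise (· > ·)) := by
  induction factors with
  | nil =>
    intro Fr S hs hsub
    exact ⟨fun x => by simp, fun x => by simp, by simpa using hs⟩
  | cons n ns ih =>
    intro Fr S hs hsub
    by_cases hc : (m * n) ∈ S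
    · have hct : S.contains (m * n) = true := List.elem_eq_true_of_mem hc
      rw [List.foldl_cons, if_pos hct]
      obtain ⟨h1, h2, h3⟩ := ih Fr S hs hsub
      refine ⟨fun x => ?_, fun x => ?_, h3⟩
      · rw [h1 x]
        constructor
        · rintro (hx | ⟨hxs, k, hk, rfl⟩)
          · exact Or.inl hx
          · exact Or.inr ⟨hxs, k, List.mem_cons_of_mem _ hk, rfl⟩
        · rintro (hx | ⟨hxs, k, hk, rfl⟩)
          · exact Or.inl hx
          · rcases List.mem_cons.mp hk with rfl | hk
            · exact absurd hc hxs
            · exact Or.inr ⟨hxs, k, hk, rfl⟩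
      · rw [h2 x]
        constructor
        · rintro (hx | ⟨k, hk, rfl⟩)
          · exact Or.inl hx
          · exact Or.inr ⟨k, List.mem_cons_of_mem _ hk, rfl⟩
        · rintro (hx | ⟨k, hk, rfl⟩)
          · exact Or.inl hx
          · rcases List.mem_cons.mp hk with rfl | hk
            · exact Or.inl hc
            · exact Or.inr ⟨k, hk, rfl⟩
    · have hcFr : (m * n) ∉ Fr := fun h => hc (hsub _ h)
      rw [List.foldl_cons, if_neg (by simp [hc])]
      obtain ⟨hins_mem, hins_sort⟩ := insert_bisect Fr (m * n) hs hcFr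
      obtain ⟨h1, h2, h3⟩ := ih _ (PySem.Set.add S (m * n)) hins_sort (by
        intro x hx
        rcases (hins_mem x).mp hx with hx | rfl
        · exact (PySem.Set.mem_add ..).mpr (Or.inl (hsub _ hx))
        · exact (PySem.Set.mem_add ..).mpr (Or.inr rfl))
      refine ⟨fun x => ?_, fun x => ?_, h3⟩
      · rw [h1 x]
        simp only [hins_mem x, PySem.Set.mem_add]
        constructor
        · rintro ((hx | rfl) | ⟨hs2, k, hk, rfl⟩)
          · exact Or.inl hx
          · exact Or.inr ⟨hc, n, by simp, rfl⟩
          · exact Or.inr ⟨fun h => hs2 (Or.inl h), k, List.mem_cons_of_mem _ hk, rfl⟩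
        · rintro (hx | ⟨hs2, k, hk, rfl⟩)
          · exact Or.inl (Or.inl hx)
          · rcases List.mem_cons.mp hk with rfl | hk
            · exact Or.inl (Or.inr rfl)
            · by_cases he : m * k = m * n
              · exact Or.inl (Or.inr he)
              · refine Or.inr ⟨?_, k, hk, rfl⟩
                rintro (h | h)
                · exact hs2 h
                · exact he h
      · rw [h2 x]
        simp only [PySem.Set.mem_add]
        constructor
        · rintro ((hx | rfl) | ⟨k, hk, rfl⟩)
          · exact Or.inl hx
          · exact Or.inr ⟨n, by simp, rfl⟩
          · exact Or.inr ⟨k, List.mem_cons_of_mem _ hk, rfl⟩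
        · rintro (hx | ⟨k, hk, rfl⟩)
          · exact Or.inl (Or.inl hx)
          · rcases List.mem_cons.mp hk with rfl | hk
            · exact Or.inl (Or.inr rfl)
            · exact Or.inr ⟨k, hk, rfl⟩

-- the main simulation: from related states, A's while loop and B's for loop agree
theorem loop_sim (nums : List Int) (D : Int) :
    ∀ fuel : Nat, ∀ (H : List Int) (F : PySem.Set Int) (Fr : List Int) (S : PySem.Set Int)
      (r : List Int) (i : Int),
    H.Pairwise (· ≤ ·) →
    Fr.Pairwise (· > ·) →
    (∀ x, x ∈ Fr ↔ (x ∈ H ∧ x ∉ F)) →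
    (∀ x, x ∈ S ↔ (x ∈ H ∨ x ∈ F)) →
    nums.length = 3 →
    H.length + 3 * (D - i).toNat ≤ fuel →
    solveLoopA nums D fuel H F r i = solveLoopB nums (D - i).toNat Fr S r := by
  intro fuel
  induction fuel with
  | zero =>
    intro H F Fr S r i _ _ _ _ _ hfuel
    have hH : H = [] := by
      cases H with
      | nil => rfl
      | cons a t => exfalso; simp only [List.length_cons] at hfuel; omega
    have hk : (D - i).toNat = 0 := by omega
    rw [hk, hH]; rfl
  | succ fuel ih =>
    intro H F Fr S r i hsort hFrS hFr hS hn hfuel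
    by_cases hiD : i < D
    · have hk : ∃ k', (D - i).toNat = k' + 1 := ⟨(D - i).toNat - 1, by omega⟩
      rcases hk with ⟨k', hk⟩
      rw [hk]
      cases H with
      | nil =>
        have hFrNil : Fr = [] := by
          cases hFre : Fr with
          | nil => rfl
          | cons a t => exact absurd ((hFr a).mp (by simp [hFre])).1 (by simp)
        simp only [solveLoopA, if_pos hiD, solveLoopB, hFrNil]
        rfl
      | cons curr rest =>
        simp only [solveLoopA, if_pos hiD]
        by_cases hfin : curr ∈ F
        · have hcont : F.contains curr = true := List.elem_eq_true_of_mem hfin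
          rw [hcont, if_pos rfl]
          have := ih rest F Fr S r i (List.pairwise_cons.mp hsort).2 hFrS
            (fun x => by
              rw [hFr x]
              constructor
              · rintro ⟨hx, hxF⟩
                rcases List.mem_cons.mp hx with rfl | hx
                · exact absurd hfin hxF
                · exact ⟨hx, hxF⟩
              · rintro ⟨hx, hxF⟩; exact ⟨List.mem_cons_of_mem _ hx, hxF⟩)
            (fun x => by
              rw [hS x]
              constructor
              · rintro (hx | hx)
                · rcases List.mem_cons.mp hx with rfl | hx
                  · exact Or.inr hfin
                  · exact Or.inl hx
                · exact Or.inr hx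
              · rintro (hx | hx)
                · exact Or.inl (List.mem_cons_of_mem _ hx)
                · exact Or.inr hx)
            hn (by simp only [List.length_cons] at hfuel ⊢; omega)
          rw [this, hk]
        · -- emit case
          have hcont : F.contains curr = false := by simp [hfin]
          rw [hcont]
          simp only [Bool.false_eq_true, if_false]
          have hcurrFr : curr ∈ Fr := (hFr curr).mpr ⟨by simp, hfin⟩
          have hFrne : Fr ≠ [] := fun h => by rw [h] at hcurrFr; simp at hcurrFr
          obtain ⟨L, mlast, hsplit⟩ : ∃ L mlast, Fr = L ++ [mlast] :=
            ⟨Fr.dropLast, Fr.getLast hFrne, (List.dropLast_append_getLast hFrne).symm⟩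
          -- the popped last element is the minimum of the frontier, which is curr
          have hcross : ∀ a ∈ L, mlast < a := by
            rw [hsplit, List.pairwise_append] at hFrS
            intro a ha
            exact hFrS.2.2 a ha mlast (by simp)
          have hme : mlast = curr := by
            have hmmem : mlast ∈ Fr := by rw [hsplit]; simp
            obtain ⟨hmH, _⟩ := (hFr mlast).mp hmmem
            have h1 : curr ≤ mlast := by
              rcases List.mem_cons.mp hmH with rfl | hmH
              · exact le_refl _
              · exact (List.pairwise_cons.mp hsort).1 mlast hmH
            have h2 : mlast ≤ curr := by
              rcases List.mem_append.mp (hsplit ▸ hcurrFr) with hcL | hcm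
              · exact le_of_lt (hcross curr hcL)
              · simp only [List.mem_singleton] at hcm; rw [hcm]
            exact le_antisymm h2 h1
          rw [hme] at hsplit hcross
          have hpop : PySem.List.pop? Fr (-1) = some (curr, L) := by
            rw [hsplit]; exact PySem.List.pop?_last L curr
          simp only [solveLoopB, hpop]
          have hLsub : ∀ x ∈ L, x ∈ S := fun x hx =>
            (hS x).mpr (Or.inl ((hFr x).mp (by rw [hsplit]; exact List.mem_append.mpr (Or.inl hx))).1)
          have hLs : L.Pairwise (· > ·) := by
            rw [hsplit, List.pairwise_append] at hFrS; exact hFrS.1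
          obtain ⟨hst1, hst2, hst3⟩ := stepB nums curr L S hLs hLsub
          have hLmem : ∀ x, x ∈ L ↔ (x ∈ Fr ∧ x ≠ curr) := by
            intro x
            constructor
            · intro hx
              exact ⟨by rw [hsplit]; exact List.mem_append.mpr (Or.inl hx),
                     fun he => absurd (hcross x hx) (by rw [he]; exact lt_irrefl _)⟩
            · rintro ⟨hx, hne⟩
              rcases List.mem_append.mp (hsplit ▸ hx) with h | h
              · exact h
              · simp only [List.mem_singleton] at h; exact absurd h hne
          have hki : (D - (i + 1)).toNat = k' := by omega
          rw [← hki]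
          refine ih _ _ _ _ _ _ (sorted_pushAll nums curr rest (List.pairwise_cons.mp hsort).2)
            hst3 ?_ ?_ hn ?_
          · intro x
            rw [hst1 x, mem_pushAll, hLmem x]
            simp only [hFr x, hS x, PySem.Set.mem_add, List.mem_cons]
            generalize (∃ n ∈ nums, x = curr * n) = E
            tauto
          · intro x
            rw [hst2 x, mem_pushAll]
            simp only [hS x, PySem.Set.mem_add, List.mem_cons]
            generalize (∃ n ∈ nums, x = curr * n) = E
            tauto
          · rw [length_pushAll, hn]
            simp only [List.length_cons] at hfuel
            omega
    · have hk : (D - i).toNat = 0 := by omega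
      rw [hk]
      cases H <;> simp [solveLoopA, solveLoopB, hiD]

-- ===== VERDICT (by name: the statement is the Claim_ definition above) =====
theorem solve_spec : Claim_equal_solve := by
  intro A B C D _hDom _hPre
  unfold Spec_solve solve solve_alt
  have hperm := PySem.List.sorted_perm (PySem.Set.ofList [A, B, C]) (fun x : Int => x) true
  have h := loop_sim [A, B, C] D (3 * D.toNat + 4) (heapify [A, B, C])
      (PySem.Set.ofList [])
      (PySem.List.sorted (PySem.Set.ofList [A, B, C]) (fun x => x) true)
      (PySem.Set.ofList (PySem.List.sorted (PySem.Set.ofList [A, B, C]) (fun x => x) true))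
      [] 0
      (sorted_heapify _)
      (pairwise_gt_of_ge_nodup _
        (PySem.List.sorted_pairwise_rev (PySem.Set.ofList [A, B, C]) (fun x => x))
        (hperm.nodup_iff.mpr (PySem.Set.nodup_ofList [A, B, C])))
      (fun x => by
        simp [PySem.List.mem_sorted, PySem.Set.mem_ofList, mem_heapify])
      (fun x => by
        simp [PySem.Set.mem_ofList, PySem.List.mem_sorted, mem_heapify])
      rfl
      (by
        have hl : (heapify [A, B, C]).length = 3 := by
          simp [heapify, heapInsert]
          split_ifs <;> simp [heapInsert] <;> split_ifs <;> rfl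
        rw [hl]; omega)
  simpa using h
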